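-- pv_equiv track=rewrite | github.com/cwinton/RoundRobinScheduler | WeightSolution.py | solution_strength
-- ===== SOURCE A (Python) =====
-- def week_strength(week, team):
--     # Defines how much time each team waits per night
--     playcount = [int(team in timeslot) for timeslot in week]
--     playtimes = sum(playcount)
--     if playtimes > 0:
--         firstplay = playcount.index(1)
--         lastplay = len(playcount) -1 - playcount[::-1].index(1)
--         return lastplay - firstplay - playtimes + 1
--     else:
--         return playtimes
--
-- def solution_strength(max_weeks = 9,max_times = 6,max_courts = 2,max_teams = 11,weeks = []):
--     total_wait_time = 0
--     sol_strength = []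
--     for week_num, week in enumerate(weeks):
--         #Iterate SOS over each week
--         sol_strength.append([])
--         for team in range(max_teams):
--             sol_strength[week_num].append(week_strength(week, team))
--         total_wait_time += sum(sol_strength[week_num])
--
--     return total_wait_time
-- ===== SOURCE B (Python) =====
-- def solution_strength(max_weeks = 9, max_times = 6, max_courts = 2, max_teams = 11, weeks = []):
--     # One pass per week over the timeslots recording (first, last, count) per team,
--     # then one pass over the per-team records; no per-team rescan of the week.
--     total_wait_time = 0
--     for week in weeks:
--         stats = [(-1, 0, 0)] * max_teams  # (first, last, count); empty when max_teams <= 0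
--         for i, slot in enumerate(week):
--             for team in slot:
--                 if 0 <= team < max_teams:
--                     f, l, c = stats[team]
--                     if c == 0:
--                         stats[team] = (i, i, 1)
--                     elif l != i:
--                         stats[team] = (f, i, c + 1)
--         for f, l, c in stats:
--             if c > 0:
--                 total_wait_time += l - f - c + 1
--     return total_wait_time
-- ===== Notes on version B (the rewrite author's own statement) =====
-- stated objective: faster
-- what changed: Instead of rescanning every week once per team (building a playcount list, summing it, and taking two .index passes for each of the max_teams teams), B makes a single pass over each week's timeslots recording (first, last, count) per team in an array and then reads the waits off in one pass over that array.
import Mathlib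
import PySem

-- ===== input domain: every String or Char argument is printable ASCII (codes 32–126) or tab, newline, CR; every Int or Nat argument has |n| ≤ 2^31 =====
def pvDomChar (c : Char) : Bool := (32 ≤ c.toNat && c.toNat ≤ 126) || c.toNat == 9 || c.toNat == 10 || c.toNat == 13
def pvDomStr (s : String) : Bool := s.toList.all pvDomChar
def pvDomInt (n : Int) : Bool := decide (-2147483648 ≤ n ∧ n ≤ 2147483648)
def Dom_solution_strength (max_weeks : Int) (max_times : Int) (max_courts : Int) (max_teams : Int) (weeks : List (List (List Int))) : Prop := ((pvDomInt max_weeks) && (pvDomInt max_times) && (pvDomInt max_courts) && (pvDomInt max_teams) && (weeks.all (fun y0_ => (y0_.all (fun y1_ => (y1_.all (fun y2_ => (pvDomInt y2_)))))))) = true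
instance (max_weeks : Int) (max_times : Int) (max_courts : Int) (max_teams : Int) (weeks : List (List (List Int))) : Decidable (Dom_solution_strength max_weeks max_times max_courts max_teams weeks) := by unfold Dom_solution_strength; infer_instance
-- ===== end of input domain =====

-- B replaces A's per-team rescans of each week (playcount list + sum + two index passes per team)
-- by one pass per week recording (first, last, count) per team; return-value equality is proved.

-- ===== PORT A =====
def week_strength (week : List (List Int)) (team : Int) : Int :=
  -- playcount = [int(team in timeslot) for timeslot in week]
  let playcount : List Int := week.map (fun timeslot => if team ∈ timeslot then 1 else 0)
  let playtimes : Int := playcount.sum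
  if playtimes > 0 then
    -- playcount.index(1) always succeeds here (playtimes > 0 forces 1 ∈ playcount), so getD 0 is exact
    let firstplay : Int := (((PySem.List.index? playcount 1).getD 0 : Nat) : Int)
    -- playcount[::-1] is playcount.reverse (PySem.List.slice?_none_none_neg_one)
    let lastplay : Int := (playcount.length : Int) - 1 - (((PySem.List.index? playcount.reverse 1).getD 0 : Nat) : Int)
    lastplay - firstplay - playtimes + 1
  else playtimes

def solution_strength (max_weeks : Int) (max_times : Int) (max_courts : Int) (max_teams : Int) (weeks : List (List (List Int))) : Int :=
  -- state = (total_wait_time, sol_strength)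
  let r := (PySem.List.enumerate weeks 0).foldl
    (fun (st : Int × List (List Int)) p =>
      let row := (PySem.List.pyRange 0 max_teams 1).foldl
        (fun acc team => acc ++ [week_strength p.2 team]) []
      (st.1 + row.sum, st.2 ++ [row]))
    (0, [])
  r.1

-- ===== PORT B =====
def pvStep (max_teams : Int) (i : Int) (st : List (Int × Int × Int)) (team : Int) : List (Int × Int × Int) :=
  if 0 ≤ team ∧ team < max_teams then
    match st[team.toNat]? with
    | some (f, l, c) =>
        if c = 0 then st.set team.toNat (i, i, 1)
        else if l ≠ i then st.set team.toNat (f, i, c + 1)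
        else st
    | none => st   -- unreachable: 0 ≤ team < max_teams = st.length
  else st

def pvWeekStats (max_teams : Int) (week : List (List Int)) : List (Int × Int × Int) :=
  (PySem.List.enumerate week 0).foldl
    (fun st p => p.2.foldl (pvStep max_teams p.1) st)
    (List.replicate max_teams.toNat (-1, 0, 0))

def solution_strength_alt (max_weeks : Int) (max_times : Int) (max_courts : Int) (max_teams : Int) (weeks : List (List (List Int))) : Int :=
  weeks.foldl (fun total week =>
    (pvWeekStats max_teams week).foldl
      (fun t v => if v.2.2 > 0 then t + (v.2.1 - v.1 - v.2.2 + 1) else t) total) 0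

-- ===== PRECONDITION & SPEC =====
def Spec_solution_strength (max_weeks : Int) (max_times : Int) (max_courts : Int) (max_teams : Int) (weeks : List (List (List Int))) (out : Int) : Prop := out = solution_strength_alt max_weeks max_times max_courts max_teams weeks
instance (max_weeks : Int) (max_times : Int) (max_courts : Int) (max_teams : Int) (weeks : List (List (List Int))) (out : Int) : Decidable (Spec_solution_strength max_weeks max_times max_courts max_teams weeks out) := by unfold Spec_solution_strength; infer_instance

-- ===== CLAIM (what is proved, stated in full; the proofs are below) =====
def Claim_equal_solution_strength : Prop := ∀ (max_weeks : Int) (max_times : Int) (max_courts : Int) (max_teams : Int) (weeks : List (List (List Int))), Dom_solution_strength max_weeks max_times max_courts max_teams weeks → Spec_solution_strength max_weeks max_times max_courts max_teams weeks (solution_strength max_weeks max_times max_courts max_teams weeks)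

-- ===== LEMMAS AND PROOFS =====

-- per-team single-slot update, and a per-team transcript of B's week pass
def pvUpd (i : Int) (v : Int × Int × Int) : Int × Int × Int :=
  if v.2.2 = 0 then (i, i, 1) else if v.2.1 ≠ i then (v.1, i, v.2.2 + 1) else v

def tstat (t : Int) : Int → List (List Int) → (Int × Int × Int) → (Int × Int × Int)
  | _, [], v => v
  | i, s :: rest, v => tstat t (i + 1) rest (if t ∈ s then pvUpd i v else v)

-- invariant a record satisfies before the slot at index i is processed
def pvInv (i : Int) (v : Int × Int × Int) : Prop := 0 ≤ v.2.2 ∧ (v.2.2 = 0 ∨ v.2.1 < i)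

def pvContrib (v : Int × Int × Int) : Int := if v.2.2 > 0 then v.2.1 - v.1 - v.2.2 + 1 else 0

-- closed-form value of a team's record after a whole week, phrased with A's quantities
def pvSpecStat (t : Int) (week : List (List Int)) : Int × Int × Int :=
  let p : List Int := week.map (fun s => if t ∈ s then 1 else 0)
  if 1 ∈ p then
    ((((PySem.List.index? p 1).getD 0 : Nat) : Int),
     (p.length : Int) - 1 - (((PySem.List.index? p.reverse 1).getD 0 : Nat) : Int),
     p.sum)
  else (-1, 0, 0)

theorem pvUpd_last (i : Int) (v : Int × Int × Int) : (pvUpd i v).2.1 = i := by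
  unfold pvUpd; split_ifs with h1 h2
  · rfl
  · rfl
  · omega

theorem pvUpd_cnt (i : Int) (v : Int × Int × Int) (h : 0 ≤ v.2.2) : 0 < (pvUpd i v).2.2 := by
  unfold pvUpd
  split_ifs with h1 h2
  · exact one_pos
  · show 0 < v.2.2 + 1
    omega
  · omega

theorem pvStep_length_one (m i t : Int) (st : List (Int × Int × Int)) :
    (pvStep m i st t).length = st.length := by
  unfold pvStep
  split
  · cases h : st[t.toNat]? with
    | none => rfl
    | some v => obtain ⟨f, l, c⟩ := v; simp only; split_ifs <;> simp [List.length_set]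
  · rfl

theorem pvStep_length (m i : Int) (slot : List Int) (st : List (Int × Int × Int)) :
    (slot.foldl (pvStep m i) st).length = st.length := by
  induction slot generalizing st with
  | nil => rfl
  | cons t rest ih => simp only [List.foldl_cons]; rw [ih, pvStep_length_one]

-- stability: once a record has count ≠ 0 and last = i, the rest of slot i leaves it unchanged
theorem pvStep_stable (m i : Int) (slot : List Int) (st : List (Int × Int × Int))
    (j : Nat) (v : Int × Int × Int) (hv : st[j]? = some v)
    (hc : v.2.2 ≠ 0) (hl : v.2.1 = i) :
    (slot.foldl (pvStep m i) st)[j]? = some v := by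
  induction slot generalizing st with
  | nil => simpa using hv
  | cons t rest ih =>
      simp only [List.foldl_cons]
      apply ih
      unfold pvStep
      split
      · cases h : st[t.toNat]? with
        | none => exact hv
        | some w =>
            obtain ⟨f, l, c⟩ := w
            dsimp only
            by_cases hj : t.toNat = j
            · subst hj
              rw [h] at hv; cases hv
              simp only at hc hl
              rw [if_neg hc, if_neg (by simp [hl])]
              exact h
            · split_ifs <;> simp_all [List.getElem?_set_ne hj]
      · exact hv

-- effect of one slot on record j: pvUpd applied once iff team j occurs in the slot
theorem pvStep_slot (m i : Int) (slot : List Int) (st : List (Int × Int × Int))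
    (j : Nat) (v : Int × Int × Int) (hj : (j : Int) < m) (hlen : j < st.length)
    (hv : st[j]? = some v) (hinv : pvInv i v) :
    (slot.foldl (pvStep m i) st)[j]? = some (if (j : Int) ∈ slot then pvUpd i v else v) := by
  induction slot generalizing st with
  | nil => simpa using hv
  | cons t rest ih =>
      simp only [List.foldl_cons]
      by_cases hteq : t = (j : Int)
      · subst hteq
        have hst : pvStep m i st ((j : Nat) : Int) = st.set j (pvUpd i v) := by
          unfold pvStep
          rw [if_pos ⟨Int.natCast_nonneg j, hj⟩]
          simp only [Int.toNat_natCast, hv]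
          obtain ⟨f, l, c⟩ := v
          obtain ⟨hge, hdis⟩ := hinv
          by_cases hc : c = 0
          · simp only at hc; simp [hc, pvUpd]
          · have hlt : l < i := by
              rcases hdis with h0 | h0
              · exact absurd h0 hc
              · exact h0
            have hli : l ≠ i := by omega
            simp [pvUpd, hc, hli]
        rw [hst]
        have hvj : (st.set j (pvUpd i v))[j]? = some (pvUpd i v) :=
          List.getElem?_set_self (by simpa using hlen)
        rw [pvStep_stable m i rest _ j (pvUpd i v) hvj
              (by have := pvUpd_cnt i v hinv.1; omega) (pvUpd_last i v)]
        simp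
      · have hpres : (pvStep m i st t)[j]? = st[j]? := by
          unfold pvStep
          split
          · rename_i hg
            cases h : st[t.toNat]? with
            | none => rfl
            | some w =>
                obtain ⟨f, l, c⟩ := w
                have hne : t.toNat ≠ j := by
                  intro he
                  exact hteq (by rw [← he, Int.toNat_of_nonneg hg.1])
                simp only
                split_ifs <;> simp [List.getElem?_set_ne hne]
          · rfl
        rw [ih (pvStep m i st t) (by rw [pvStep_length_one]; exact hlen)
              (by rw [hpres]; exact hv)]
        have hmem : ((j : Int) ∈ t :: rest) ↔ ((j : Int) ∈ rest) := by
          simp only [List.mem_cons]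
          exact or_iff_right (fun h => hteq h.symm)
        simp only [hmem]

-- record j after B's whole week pass is the per-team transcript tstat
theorem pvWeek_entry (m : Int) (xs : List (List Int)) (i : Int) (st : List (Int × Int × Int))
    (j : Nat) (v : Int × Int × Int) (hj : (j : Int) < m) (hlen : j < st.length)
    (hv : st[j]? = some v) (hinv : pvInv i v) :
    ((PySem.List.enumerate xs i).foldl (fun st p => p.2.foldl (pvStep m p.1) st) st)[j]?
      = some (tstat (j : Int) i xs v) := by
  induction xs generalizing i st v with
  | nil => simp only [PySem.List.enumerate_nil, List.foldl_nil, tstat]; exact hv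
  | cons s rest ih =>
      rw [PySem.List.enumerate_cons, List.foldl_cons]
      simp only [tstat]
      have hst := pvStep_slot m i s st j v hj hlen hv hinv
      apply ih (i + 1) _ _ (by rw [pvStep_length]; exact hlen) hst
      by_cases hmem : (j : Int) ∈ s
      · rw [if_pos hmem]
        exact ⟨le_of_lt (pvUpd_cnt i v hinv.1), Or.inr (by rw [pvUpd_last]; omega)⟩
      · rw [if_neg hmem]
        exact ⟨hinv.1, by rcases hinv.2 with h | h; exact Or.inl h; exact Or.inr (by omega)⟩

theorem pvWeekStats_length (m : Int) (week : List (List Int)) :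
    (pvWeekStats m week).length = m.toNat := by
  unfold pvWeekStats
  have aux : ∀ (xs : List (List Int)) (i : Int) (st : List (Int × Int × Int)),
      ((PySem.List.enumerate xs i).foldl (fun st p => p.2.foldl (pvStep m p.1) st) st).length
        = st.length := by
    intro xs
    induction xs with
    | nil => intro i st; simp [PySem.List.enumerate_nil]
    | cons s rest ih =>
        intro i st
        rw [PySem.List.enumerate_cons, List.foldl_cons, ih, pvStep_length]
  rw [aux, List.length_replicate]

theorem pvWeekStats_entry (m : Int) (week : List (List Int)) (j : Nat) (hj : j < m.toNat) :
    (pvWeekStats m week)[j]? = some (tstat (j : Int) 0 week (-1, 0, 0)) := by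
  unfold pvWeekStats
  exact pvWeek_entry m week 0 _ j (-1, 0, 0) (by omega)
    (by rw [List.length_replicate]; exact hj)
    (List.getElem?_replicate_of_lt hj)
    ⟨le_refl 0, Or.inl rfl⟩

-- tstat over an appended slot
theorem tstat_append (t : Int) (xs : List (List Int)) (s : List Int) (i : Int)
    (v : Int × Int × Int) :
    tstat t i (xs ++ [s]) v
      = (if t ∈ s then pvUpd (i + xs.length) (tstat t i xs v) else tstat t i xs v) := by
  induction xs generalizing i v with
  | nil => simp [tstat]
  | cons x rest ih =>
      simp only [List.cons_append, tstat, ih, List.length_cons]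
      congr 2
      push_cast
      ring

-- the 0/1 sum is the count of slots containing t
theorem pvSum_count (t : Int) (week : List (List Int)) :
    (week.map (fun s => if t ∈ s then (1 : Int) else 0)).sum
      = (week.countP (fun s => decide (t ∈ s)) : Int) := by
  have := PySem.List.sum_map_ite_one_zero (xs := week) (p := fun s => decide (t ∈ s))
  simpa using this

theorem pvOne_mem (t : Int) (week : List (List Int)) :
    ((1 : Int) ∈ week.map (fun s => if t ∈ s then (1 : Int) else 0)) ↔ ∃ s ∈ week, t ∈ s := by
  simp

theorem pvSum_pos (t : Int) (week : List (List Int))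
    (h : (1 : Int) ∈ week.map (fun s => if t ∈ s then (1 : Int) else 0)) :
    0 < (week.map (fun s => if t ∈ s then (1 : Int) else 0)).sum := by
  rw [pvSum_count]
  obtain ⟨s, hs, hts⟩ := (pvOne_mem t week).mp h
  have : 0 < week.countP (fun s => decide (t ∈ s)) :=
    List.countP_pos_iff.mpr ⟨s, hs, by simpa using hts⟩
  exact_mod_cast this

theorem pvSum_zero (t : Int) (week : List (List Int))
    (h : (1 : Int) ∉ week.map (fun s => if t ∈ s then (1 : Int) else 0)) :
    (week.map (fun s => if t ∈ s then (1 : Int) else 0)).sum = 0 := by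
  rw [pvSum_count]
  have : week.countP (fun s => decide (t ∈ s)) = 0 := by
    rw [List.countP_eq_zero]
    intro s hs
    simp only [decide_eq_true_iff]
    intro hts
    exact h ((pvOne_mem t week).mpr ⟨s, hs, hts⟩)
  simp [this]

theorem pvIndex_lt (p : List Int) (h : (1 : Int) ∈ p) :
    ∃ k, PySem.List.index? p 1 = some k ∧ k < p.length := by
  have h1 := (PySem.List.index?_isSome_iff (xs := p) (v := 1)).mpr h
  obtain ⟨k, hk⟩ := Option.isSome_iff_exists.mp h1
  obtain ⟨hlt, -, -⟩ := PySem.List.getElem_of_index?_eq_some hk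
  exact ⟨k, hk, hlt⟩

-- the transcript equals the closed form built from A's quantities
theorem tstat_spec (t : Int) (week : List (List Int)) :
    tstat t 0 week (-1, 0, 0) = pvSpecStat t week := by
  induction week using List.reverseRecOn with
  | nil => simp [tstat, pvSpecStat]
  | append_singleton week s ih =>
      rw [tstat_append, ih]
      unfold pvSpecStat
      simp only [List.map_append, List.map_cons, List.map_nil, zero_add]
      have hpl : (week.map (fun s => if t ∈ s then (1 : Int) else 0)).length = week.length := by
        simp
      by_cases ht : t ∈ s
      · rw [if_pos ht]
        have he : (if t ∈ s then (1 : Int) else 0) = 1 := if_pos ht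
        rw [he]
        have hmem' : (1 : Int) ∈ week.map (fun s => if t ∈ s then (1 : Int) else 0) ++ [1] := by
          simp
        rw [if_pos hmem']
        have hrev : (week.map (fun s => if t ∈ s then (1 : Int) else 0) ++ [(1 : Int)]).reverse
            = 1 :: (week.map (fun s => if t ∈ s then (1 : Int) else 0)).reverse := by simp
        by_cases hpm : (1 : Int) ∈ week.map (fun s => if t ∈ s then (1 : Int) else 0)
        · rw [if_pos hpm]
          obtain ⟨k, hk, hklt⟩ := pvIndex_lt _ hpm
          obtain ⟨kr, hkrv, hkrlt'⟩ :=
            pvIndex_lt (week.map (fun s => if t ∈ s then (1 : Int) else 0)).reverse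
              (by simpa using hpm)
          have hkrlt : kr < week.length := by
            rw [List.length_reverse, hpl] at hkrlt'
            exact hkrlt'
          have hcpos := pvSum_pos t week hpm
          rw [PySem.List.index?_append_of_mem _ hpm, hrev, PySem.List.index?_cons_self]
          simp only [pvUpd, hk, hkrv, Option.getD_some, List.length_append, List.length_cons,
            List.length_nil, List.sum_append, List.sum_cons, List.sum_nil, hpl]
          rw [if_neg (by omega), if_pos (by omega)]
          simp only [Prod.mk.injEq]
          refine ⟨trivial, ?_, by push_cast; ring⟩
          push_cast
          ring
        · rw [if_neg hpm]
          have hz := pvSum_zero t week hpm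
          rw [PySem.List.index?_append_singleton_self _ _ hpm, hrev,
            PySem.List.index?_cons_self]
          simp only [pvUpd, Option.getD_some, List.length_append, List.length_cons,
            List.length_nil, List.sum_append, List.sum_cons, List.sum_nil, hpl, hz]
          norm_num
      · rw [if_neg ht]
        have he : (if t ∈ s then (1 : Int) else 0) = 0 := if_neg ht
        rw [he]
        have hrev : (week.map (fun s => if t ∈ s then (1 : Int) else 0) ++ [(0 : Int)]).reverse
            = 0 :: (week.map (fun s => if t ∈ s then (1 : Int) else 0)).reverse := by simp
        by_cases hpm : (1 : Int) ∈ week.map (fun s => if t ∈ s then (1 : Int) else 0)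
        · rw [if_pos hpm, if_pos (by simp [hpm])]
          obtain ⟨kr, hkrv, hkrlt'⟩ :=
            pvIndex_lt (week.map (fun s => if t ∈ s then (1 : Int) else 0)).reverse
              (by simpa using hpm)
          rw [PySem.List.index?_append_of_mem _ hpm, hrev,
            PySem.List.index?_cons_of_ne _ (by norm_num), hkrv]
          simp only [Option.map_some, Option.getD_some, List.length_append, List.length_cons,
            List.length_nil, List.sum_append, List.sum_cons, List.sum_nil, hpl,
            Prod.mk.injEq]
          refine ⟨trivial, ?_, by push_cast; ring⟩
          push_cast
          ring
        · rw [if_neg hpm, if_neg (by simp [hpm])]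

theorem pvContrib_spec (t : Int) (week : List (List Int)) :
    pvContrib (pvSpecStat t week) = week_strength week t := by
  unfold pvContrib pvSpecStat week_strength
  simp only
  set p : List Int := week.map (fun s => if t ∈ s then 1 else 0) with hp
  by_cases hpm : (1 : Int) ∈ p
  · have hpos := pvSum_pos t week hpm
    rw [if_pos hpm]
    simp only [← hp] at hpos ⊢
    rw [if_pos (by simpa using hpos), if_pos hpos]
  · rw [if_neg hpm]
    have hz := pvSum_zero t week hpm
    simp only [← hp] at hz ⊢
    rw [hz]
    norm_num

theorem pvFold_contrib (stats : List (Int × Int × Int)) (total : Int) :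
    stats.foldl (fun t v => if v.2.2 > 0 then t + (v.2.1 - v.1 - v.2.2 + 1) else t) total
      = total + (stats.map pvContrib).sum := by
  induction stats generalizing total with
  | nil => simp
  | cons v rest ih =>
      simp only [List.foldl_cons, List.map_cons, List.sum_cons, ih, pvContrib]
      split_ifs <;> ring

theorem pvStats_map (m : Int) (week : List (List Int)) :
    (pvWeekStats m week).map pvContrib
      = (List.range m.toNat).map (fun j : Nat => week_strength week (j : Int)) := by
  apply List.ext_getElem
  · simp [pvWeekStats_length]
  · intro j h1 h2
    have hj : j < m.toNat := by simpa [pvWeekStats_length] using h1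
    have he := pvWeekStats_entry m week j hj
    have hgl : j < (pvWeekStats m week).length := by rw [pvWeekStats_length]; exact hj
    have hg : (pvWeekStats m week)[j] = tstat (j : Int) 0 week (-1, 0, 0) := by
      have := List.getElem?_eq_getElem hgl
      rw [this] at he
      exact Option.some.inj he
    simp only [List.getElem_map, hg, tstat_spec, pvContrib_spec, List.getElem_range]

-- B's per-week accumulation equals A's row sum
theorem pvWeek_total (m : Int) (week : List (List Int)) (total : Int) :
    (pvWeekStats m week).foldl
        (fun t v => if v.2.2 > 0 then t + (v.2.1 - v.1 - v.2.2 + 1) else t) total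
      = total + ((PySem.List.pyRange 0 m 1).foldl
          (fun acc team => acc ++ [week_strength week team]) []).sum := by
  rw [pvFold_contrib, pvStats_map, PySem.List.foldl_append_singleton_eq_map,
      PySem.List.pyRange_one]
  simp [List.map_map, Function.comp_def]

theorem pvOuter (m : Int) (weeks : List (List (List Int))) (i total : Int)
    (ss : List (List Int)) :
    ((PySem.List.enumerate weeks i).foldl
        (fun (st : Int × List (List Int)) p =>
          let row := (PySem.List.pyRange 0 m 1).foldl
            (fun acc team => acc ++ [week_strength p.2 team]) []
          (st.1 + row.sum, st.2 ++ [row]))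
        (total, ss)).1
      = weeks.foldl (fun total week =>
          (pvWeekStats m week).foldl
            (fun t v => if v.2.2 > 0 then t + (v.2.1 - v.1 - v.2.2 + 1) else t) total) total := by
  induction weeks generalizing i total ss with
  | nil => simp [PySem.List.enumerate_nil]
  | cons w rest ih =>
      rw [PySem.List.enumerate_cons, List.foldl_cons, List.foldl_cons]
      simp only
      rw [ih, pvWeek_total]

-- ===== VERDICT (by name: the statement is the Claim_ definition above) =====
theorem solution_strength_spec : Claim_equal_solution_strength := by
  intro max_weeks max_times max_courts max_teams weeks _
  unfold Spec_solution_strength solution_strength solution_strength_alt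
  simp only
  exact pvOuter max_teams weeks 0 0 []
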